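-- pv_equiv track=rewrite | github.com/Lzww0608/smt | app/services/redundancy_optimizer.py | _split_top_level_commands
-- ===== SOURCE A (Python) =====
-- from typing import Dict, List, Optional, Set, Tuple
--
-- def _split_top_level_commands(smt_code: str) -> List[str]:
--     commands = []  # type: List[str]
--     buffer = []  # type: List[str]
--     depth = 0
--     in_string = False
--     escape = False
--     in_comment = False
--
--     for character in smt_code:
--         if in_comment:
--             if character == "\n":
--                 in_comment = False
--                 if depth > 0:
--                     buffer.append(" ")
--             continue
--
--         if in_string:
--             buffer.append(character)
--             if escape:
--                 escape = False
--             elif character == "\\":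
--                 escape = True
--             elif character == '"':
--                 in_string = False
--             continue
--
--         if character == ";":
--             in_comment = True
--             continue
--
--         if character == '"':
--             in_string = True
--             buffer.append(character)
--             continue
--
--         if character == "(":
--             depth += 1
--             buffer.append(character)
--             continue
--
--         if character == ")":
--             depth = max(0, depth - 1)
--             buffer.append(character)
--             if depth == 0:
--                 command = "".join(buffer).strip()
--                 if command:
--                     commands.append(command)
--                 buffer = []
--             continue
--
--         if depth == 0:
--             if character.isspace():
--                 if buffer:
--                     command = "".join(buffer).strip()
--                     if command:
--                         commands.append(command)
--                     buffer = []
--                 continue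
--             buffer.append(character)
--         else:
--             buffer.append(character)
--
--     trailing = "".join(buffer).strip()
--     if trailing:
--         commands.append(trailing)
--     return commands
-- ===== SOURCE B (Python) =====
-- from typing import List, Tuple
--
-- def _tokenize(smt_code: str):
--     """Pass 1: lex the input into a flat token list.
--     Tokens: ('open',), ('close',), ('str', raw), ('atom', raw), ('ws', raw),
--     ('comment', saw_newline)."""
--     tokens = []
--     i, n = 0, len(smt_code)
--     while i < n:
--         c = smt_code[i]
--         if c == ';':
--             j = smt_code.find('\n', i + 1)
--             if j == -1:
--                 tokens.append(('comment', False))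
--                 i = n
--             else:
--                 tokens.append(('comment', True))
--                 i = j + 1
--         elif c == '"':
--             j = i + 1
--             esc = False
--             while j < n:
--                 ch = smt_code[j]
--                 j += 1
--                 if esc:
--                     esc = False
--                 elif ch == '\\':
--                     esc = True
--                 elif ch == '"':
--                     break
--             tokens.append(('str', smt_code[i:j]))
--             i = j
--         elif c == '(':
--             tokens.append(('open', None))
--             i += 1
--         elif c == ')':
--             tokens.append(('close', None))
--             i += 1
--         elif c.isspace():
--             j = i + 1
--             while j < n and smt_code[j].isspace():
--                 j += 1
--             tokens.append(('ws', smt_code[i:j]))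
--             i = j
--         else:
--             j = i + 1
--             while j < n and smt_code[j] not in ';"()' and not smt_code[j].isspace():
--                 j += 1
--             tokens.append(('atom', smt_code[i:j]))
--             i = j
--
--     return tokens
--
-- def _split_top_level_commands(smt_code: str) -> List[str]:
--     # Pass 2: assemble commands from the token stream.
--     commands = []  # type: List[str]
--     buf = ''
--     depth = 0
--     for kind, val in _tokenize(smt_code):
--         if kind == 'open':
--             depth += 1
--             buf += '('
--         elif kind == 'close':
--             depth = max(0, depth - 1)
--             buf += ')'
--             if depth == 0:
--                 cmd = buf.strip()
--                 if cmd: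
--                     commands.append(cmd)
--                 buf = ''
--         elif kind in ('str', 'atom'):
--             buf += val
--         elif kind == 'ws':
--             if depth == 0:
--                 cmd = buf.strip()
--                 if cmd:
--                     commands.append(cmd)
--                 buf = ''
--             else:
--                 buf += val
--         else:  # comment
--             if val and depth > 0:
--                 buf += ' '
--     cmd = buf.strip()
--     if cmd:
--         commands.append(cmd)
--     return commands
-- ===== Notes on version B (the rewrite author's own statement) =====
-- stated objective: alternative
-- what changed: Replaced A's single character-level state machine (persistent in_comment/in_string/escape flags) by a two-stage pipeline: a lexer that first turns the input into a flat token list (open/close/string/atom/whitespace/comment tokens), then a separate fold over tokens that tracks only the paren depth and assembles the commands.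
import Mathlib
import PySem

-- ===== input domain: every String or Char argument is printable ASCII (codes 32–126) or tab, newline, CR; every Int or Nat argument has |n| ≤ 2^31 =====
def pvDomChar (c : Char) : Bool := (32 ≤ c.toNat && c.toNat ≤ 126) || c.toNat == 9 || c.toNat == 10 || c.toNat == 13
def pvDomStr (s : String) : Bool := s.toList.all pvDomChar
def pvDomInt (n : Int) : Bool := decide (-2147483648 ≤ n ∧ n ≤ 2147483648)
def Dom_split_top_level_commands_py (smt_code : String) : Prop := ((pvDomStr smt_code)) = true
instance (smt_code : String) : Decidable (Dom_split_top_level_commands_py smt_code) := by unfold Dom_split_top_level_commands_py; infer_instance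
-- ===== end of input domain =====

-- B replaces A's single character-level state machine by a two-stage pipeline: a lexer
-- producing a flat token list, then a fold over tokens assembling the commands
-- (objective: alternative decomposition; return values proved equal on the whole domain).

-- ===== PORT A =====
-- state: (commands, buffer, depth, in_string, escape, in_comment)
def pvStepA (st : List String × List Char × Nat × Bool × Bool × Bool) (c : Char) :
    List String × List Char × Nat × Bool × Bool × Bool :=
  let (commands, buffer, depth, inString, escape, inComment) := st
  if inComment then
    if c = '\n' then
      (commands, (if depth > 0 then buffer ++ [' '] else buffer), depth, inString, escape, false)
    else st
  else if inString then
    let buffer := buffer ++ [c]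
    if escape then (commands, buffer, depth, inString, false, inComment)
    else if c = '\\' then (commands, buffer, depth, inString, true, inComment)
    else if c = '"' then (commands, buffer, depth, false, escape, inComment)
    else (commands, buffer, depth, inString, escape, inComment)
  else if c = ';' then (commands, buffer, depth, inString, escape, true)
  else if c = '"' then (commands, buffer ++ [c], depth, true, escape, inComment)
  else if c = '(' then (commands, buffer ++ [c], depth + 1, inString, escape, inComment)
  else if c = ')' then
    let depth := depth - 1  -- Nat subtraction = max 0 (depth - 1)
    let buffer := buffer ++ [c]
    if depth = 0 then
      let command := PySem.Chars.strip buffer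
      ((if command ≠ [] then commands ++ [String.mk command] else commands), [], depth, inString, escape, inComment)
    else (commands, buffer, depth, inString, escape, inComment)
  else if depth = 0 then
    if PySem.Chars.isspace c then
      if buffer ≠ [] then
        let command := PySem.Chars.strip buffer
        ((if command ≠ [] then commands ++ [String.mk command] else commands), [], depth, inString, escape, inComment)
      else st
    else (commands, buffer ++ [c], depth, inString, escape, inComment)
  else (commands, buffer ++ [c], depth, inString, escape, inComment)

def split_top_level_commands_py (smt_code : String) : List String :=
  let st := smt_code.toList.foldl pvStepA ([], [], 0, false, false, false)
  let (commands, buffer, _, _, _, _) := st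
  let trailing := PySem.Chars.strip buffer
  if trailing ≠ [] then commands ++ [String.mk trailing] else commands

-- ===== PORT B =====
-- token type of B's lexer
inductive PvTok where
  | popen : PvTok
  | pclose : PvTok
  | pstr : List Char → PvTok
  | patom : List Char → PvTok
  | pws : List Char → PvTok
  | pcomment : Bool → PvTok
deriving Repr, DecidableEq

-- ';' token: skip to past the newline; returns (saw_newline, rest)
def pvLexComment : List Char → Bool × List Char
  | [] => (false, [])
  | c :: cs => if c = '\n' then (true, cs) else pvLexComment cs

-- '"' token: collect chars (tracking escape) up to and including the closing quote
def pvLexString : List Char → Bool → List Char × List Char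
  | [], _ => ([], [])
  | c :: cs, esc =>
    if esc then
      let r := pvLexString cs false; (c :: r.1, r.2)
    else if c = '\\' then
      let r := pvLexString cs true; (c :: r.1, r.2)
    else if c = '"' then ([c], cs)
    else
      let r := pvLexString cs false; (c :: r.1, r.2)

-- maximal run satisfying p (the ws / atom inner while-loops of Source B)
def pvSpan (p : Char → Bool) : List Char → List Char × List Char
  | [] => ([], [])
  | c :: cs => if p c then let r := pvSpan p cs; (c :: r.1, r.2) else ([], c :: cs)

def pvAtomChar (c : Char) : Bool :=
  !(c = ';' || c = '"' || c = '(' || c = ')') && !(PySem.Chars.isspace c)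

theorem pvLexComment_len : ∀ cs : List Char, (pvLexComment cs).2.length ≤ cs.length := by
  intro cs; induction cs with
  | nil => simp [pvLexComment]
  | cons c cs ih => by_cases h : c = '\n' <;> simp [pvLexComment, h] <;> omega

theorem pvLexString_len : ∀ (cs : List Char) (e : Bool),
    (pvLexString cs e).2.length ≤ cs.length := by
  intro cs; induction cs with
  | nil => intro e; simp [pvLexString]
  | cons c cs ih =>
    intro e
    rw [pvLexString]
    split_ifs with h1 h2 h3
    · exact le_trans (ih _) (Nat.le_succ _)
    · exact le_trans (ih _) (Nat.le_succ _)
    · simp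
    · exact le_trans (ih _) (Nat.le_succ _)

theorem pvSpan_len : ∀ (p : Char → Bool) (cs : List Char),
    (pvSpan p cs).2.length ≤ cs.length := by
  intro p cs; induction cs with
  | nil => simp [pvSpan]
  | cons c cs ih => by_cases h : p c <;> simp [pvSpan, h] <;> omega

-- pass 1 of Source B: the lexer
def pvLex : List Char → List PvTok
  | [] => []
  | c :: cs =>
    if c = ';' then
      let r := pvLexComment cs
      PvTok.pcomment r.1 :: pvLex r.2
    else if c = '"' then
      let r := pvLexString cs false
      PvTok.pstr (c :: r.1) :: pvLex r.2
    else if c = '(' then PvTok.popen :: pvLex cs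
    else if c = ')' then PvTok.pclose :: pvLex cs
    else if PySem.Chars.isspace c then
      let r := pvSpan PySem.Chars.isspace cs
      PvTok.pws (c :: r.1) :: pvLex r.2
    else
      let r := pvSpan pvAtomChar cs
      PvTok.patom (c :: r.1) :: pvLex r.2
  termination_by cs => cs.length
  decreasing_by
  · exact Nat.lt_succ_of_le (pvLexComment_len cs)
  · exact Nat.lt_succ_of_le (pvLexString_len cs false)
  · simp
  · simp
  · exact Nat.lt_succ_of_le (pvSpan_len PySem.Chars.isspace cs)
  · exact Nat.lt_succ_of_le (pvSpan_len pvAtomChar cs)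

def pvFlushB (commands : List String) (buf : List Char) : List String :=
  let command := PySem.Chars.strip buf
  if command ≠ [] then commands ++ [String.mk command] else commands

-- pass 2 of Source B: one step of the assembling fold; state = (commands, buf, depth)
def pvStep2 (st : List String × List Char × Nat) (t : PvTok) :
    List String × List Char × Nat :=
  let (commands, buf, depth) := st
  match t with
  | PvTok.popen => (commands, buf ++ ['('], depth + 1)
  | PvTok.pclose =>
    let depth := depth - 1
    let buf := buf ++ [')']
    if depth = 0 then (pvFlushB commands buf, [], depth)
    else (commands, buf, depth)
  | PvTok.pstr s => (commands, buf ++ s, depth)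
  | PvTok.patom s => (commands, buf ++ s, depth)
  | PvTok.pws s =>
    if depth = 0 then (pvFlushB commands buf, [], depth)
    else (commands, buf ++ s, depth)
  | PvTok.pcomment saw =>
    if saw && decide (depth > 0) then (commands, buf ++ [' '], depth) else st

def split_top_level_commands_py_alt (smt_code : String) : List String :=
  let st := (pvLex smt_code.toList).foldl pvStep2 ([], [], 0)
  pvFlushB st.1 st.2.1

-- ===== PRECONDITION & SPEC =====
def Spec_split_top_level_commands_py (smt_code : String) (out : List String) : Prop := out = split_top_level_commands_py_alt smt_code
instance (smt_code : String) (out : List String) : Decidable (Spec_split_top_level_commands_py smt_code out) := by unfold Spec_split_top_level_commands_py; infer_instance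

-- ===== CLAIM (what is proved, stated in full; the proofs are below) =====
def Claim_equal_split_top_level_commands_py : Prop := ∀ (smt_code : String), Dom_split_top_level_commands_py smt_code → Spec_split_top_level_commands_py smt_code (split_top_level_commands_py smt_code)

-- ===== LEMMAS AND PROOFS =====

-- result extractor for A's fold from an arbitrary reachable state
def pvRunA (cs : List Char) (st : List String × List Char × Nat × Bool × Bool × Bool) : List String :=
  let (commands, buffer, _, _, _, _) := cs.foldl pvStepA st
  let trailing := PySem.Chars.strip buffer
  if trailing ≠ [] then commands ++ [String.mk trailing] else commands

-- result extractor for B's token fold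
def pvRunB (toks : List PvTok) (commands : List String) (buf : List Char) (depth : Nat) : List String :=
  let st := toks.foldl pvStep2 (commands, buf, depth)
  pvFlushB st.1 st.2.1

theorem pvSpan_append : ∀ (p : Char → Bool) (cs : List Char),
    (pvSpan p cs).1 ++ (pvSpan p cs).2 = cs := by
  intro p cs; induction cs with
  | nil => simp [pvSpan]
  | cons c cs ih => by_cases h : p c <;> simp [pvSpan, h, ih]

theorem pvSpan_mem : ∀ (p : Char → Bool) (cs : List Char) (x : Char),
    x ∈ (pvSpan p cs).1 → p x = true := by
  intro p cs; induction cs with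
  | nil => intro x hx; simp [pvSpan] at hx
  | cons c cs ih =>
    intro x hx
    by_cases h : p c
    · simp [pvSpan, h] at hx
      rcases hx with rfl | hx
      · exact h
      · exact ih x hx
    · simp [pvSpan, h] at hx

theorem isspace_ne_special : ∀ c : Char, PySem.Chars.isspace c = true →
    c ≠ ';' ∧ c ≠ '"' ∧ c ≠ '(' ∧ c ≠ ')' := by
  intro c h
  refine ⟨?_, ?_, ?_, ?_⟩ <;> rintro rfl <;> simp [PySem.Chars.isspace] at h

-- A's fold over a comment body = B's pcomment token effect
theorem pvRunA_comment : ∀ (cs : List Char) (commands : List String) (buf : List Char) (depth : Nat),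
    pvRunA cs (commands, buf, depth, false, false, true) =
      pvRunA (pvLexComment cs).2
        (commands, (if (pvLexComment cs).1 then (if depth > 0 then buf ++ [' '] else buf) else buf),
          depth, false, false, false) := by
  intro cs
  induction cs with
  | nil => intro commands buf depth; simp [pvLexComment, pvRunA]
  | cons c cs ih =>
    intro commands buf depth
    by_cases h : c = '\n'
    · simp [pvRunA, List.foldl_cons, pvStepA, pvLexComment, h]
    · simp only [pvRunA, List.foldl_cons, pvStepA, pvLexComment, if_neg h, if_pos rfl]
      exact ih commands buf depth

-- A's fold over a string body = appending B's pstr token body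
theorem pvRunA_string : ∀ (cs : List Char) (commands : List String) (buf : List Char) (depth : Nat) (esc : Bool),
    pvRunA cs (commands, buf, depth, true, esc, false) =
      pvRunA (pvLexString cs esc).2
        (commands, buf ++ (pvLexString cs esc).1, depth, false, false, false) := by
  intro cs
  induction cs with
  | nil => intro commands buf depth esc; simp [pvLexString, pvRunA]
  | cons c cs ih =>
    intro commands buf depth esc
    rw [pvLexString]
    cases esc with
    | true =>
      have lhs : pvRunA (c :: cs) (commands, buf, depth, true, true, false) =
          pvRunA cs (commands, buf ++ [c], depth, true, false, false) := by
        simp [pvRunA, List.foldl_cons, pvStepA]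
      rw [lhs, ih commands (buf ++ [c]) depth false]
      simp [List.append_assoc]
    | false =>
      by_cases h1 : c = '\\'
      · have lhs : pvRunA (c :: cs) (commands, buf, depth, true, false, false) =
            pvRunA cs (commands, buf ++ [c], depth, true, true, false) := by
          simp [pvRunA, List.foldl_cons, pvStepA, h1]
        rw [lhs, ih commands (buf ++ [c]) depth true]
        simp [h1, List.append_assoc]
      · by_cases h2 : c = '"'
        · simp [pvRunA, List.foldl_cons, pvStepA, h1, h2]
        · have lhs : pvRunA (c :: cs) (commands, buf, depth, true, false, false) =
              pvRunA cs (commands, buf ++ [c], depth, true, false, false) := by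
            simp [pvRunA, List.foldl_cons, pvStepA, h1, h2]
          rw [lhs, ih commands (buf ++ [c]) depth false]
          simp [h1, h2, List.append_assoc]

-- A's fold over a run of whitespace at depth 0 with an empty buffer does nothing
theorem pvFoldA_ws0 : ∀ (l : List Char) (commands : List String),
    (∀ x ∈ l, PySem.Chars.isspace x = true) →
    List.foldl pvStepA (commands, [], 0, false, false, false) l =
      (commands, [], 0, false, false, false) := by
  intro l
  induction l with
  | nil => intro commands _; simp
  | cons c cs ih =>
    intro commands h
    have hc := h c (by simp)
    obtain ⟨n1, n2, n3, n4⟩ := isspace_ne_special c hc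
    rw [List.foldl_cons]
    have : pvStepA (commands, [], 0, false, false, false) c =
        (commands, [], 0, false, false, false) := by
      simp [pvStepA, n1, n2, n3, n4, hc]
    rw [this]
    exact ih commands (fun x hx => h x (by simp [hx]))

-- A's fold over a run of non-special chars appends them to the buffer
theorem pvFoldA_append : ∀ (l : List Char) (commands : List String) (buf : List Char) (depth : Nat),
    (∀ x ∈ l, (x ≠ ';' ∧ x ≠ '"' ∧ x ≠ '(' ∧ x ≠ ')') ∧
      (depth = 0 → PySem.Chars.isspace x = false)) →
    List.foldl pvStepA (commands, buf, depth, false, false, false) l =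
      (commands, buf ++ l, depth, false, false, false) := by
  intro l
  induction l with
  | nil => intro commands buf depth _; simp
  | cons c cs ih =>
    intro commands buf depth h
    obtain ⟨⟨n1, n2, n3, n4⟩, hsp⟩ := h c (by simp)
    rw [List.foldl_cons]
    have : pvStepA (commands, buf, depth, false, false, false) c =
        (commands, buf ++ [c], depth, false, false, false) := by
      by_cases hd : depth = 0
      · simp [pvStepA, n1, n2, n3, n4, hd, hsp hd]
      · simp [pvStepA, n1, n2, n3, n4, hd]
    rw [this, ih commands (buf ++ [c]) depth (fun x hx => h x (by simp [hx]))]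
    simp

-- main correspondence: running A from a clean state = running B's pass 2 over the lex
theorem pvRunA_eq_runB : ∀ (n : Nat) (cs : List Char), cs.length ≤ n →
    ∀ (buf : List Char) (depth : Nat) (commands : List String),
      pvRunA cs (commands, buf, depth, false, false, false) =
        pvRunB (pvLex cs) commands buf depth := by
  intro n
  induction n with
  | zero =>
    intro cs hcs buf depth commands
    have : cs = [] := List.eq_nil_of_length_eq_zero (Nat.le_zero.mp hcs)
    subst this
    simp only [pvRunA, pvLex, pvRunB, pvFlushB, List.foldl_nil]
    by_cases h : PySem.Chars.strip buf = [] <;> simp [h]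
  | succ n ih =>
    intro cs hcs buf depth commands
    cases cs with
    | nil =>
      simp only [pvRunA, pvLex, pvRunB, pvFlushB, List.foldl_nil]
      by_cases h : PySem.Chars.strip buf = [] <;> simp [h]
    | cons c cs =>
      rw [pvLex]
      by_cases h0 : c = ';'
      · rw [if_pos h0]
        have lhs : pvRunA (c :: cs) (commands, buf, depth, false, false, false) =
            pvRunA cs (commands, buf, depth, false, false, true) := by
          simp [pvRunA, List.foldl_cons, pvStepA, h0]
        rw [lhs, pvRunA_comment,
          ih (pvLexComment cs).2 (le_trans (pvLexComment_len cs) (Nat.le_of_succ_le_succ hcs))]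
        have hstep : pvStep2 (commands, buf, depth) (PvTok.pcomment (pvLexComment cs).1) =
            (commands,
              (if (pvLexComment cs).1 then (if depth > 0 then buf ++ [' '] else buf) else buf),
              depth) := by
          by_cases hs : (pvLexComment cs).1 <;> by_cases hd : depth > 0 <;>
            simp [pvStep2, hs, hd]
        simp only [pvRunB, List.foldl_cons, hstep]
      · rw [if_neg h0]
        by_cases h1 : c = '"'
        · rw [if_pos h1]
          have lhs : pvRunA (c :: cs) (commands, buf, depth, false, false, false) =
              pvRunA cs (commands, buf ++ [c], depth, true, false, false) := by
            simp [pvRunA, List.foldl_cons, pvStepA, h0, h1]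
          rw [lhs, pvRunA_string,
            ih (pvLexString cs false).2
              (le_trans (pvLexString_len cs false) (Nat.le_of_succ_le_succ hcs))]
          simp [pvRunB, List.foldl_cons, pvStep2]
        · rw [if_neg h1]
          by_cases h2 : c = '('
          · rw [if_pos h2]
            have lhs : pvRunA (c :: cs) (commands, buf, depth, false, false, false) =
                pvRunA cs (commands, buf ++ [c], depth + 1, false, false, false) := by
              simp [pvRunA, List.foldl_cons, pvStepA, h0, h1, h2]
            rw [lhs, ih cs (Nat.le_of_succ_le_succ hcs)]
            simp [pvRunB, List.foldl_cons, pvStep2, h2]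
          · rw [if_neg h2]
            by_cases h3 : c = ')'
            · rw [if_pos h3]
              by_cases hd : depth - 1 = 0
              · have lhs : pvRunA (c :: cs) (commands, buf, depth, false, false, false) =
                    pvRunA cs (pvFlushB commands (buf ++ [c]), [], depth - 1, false, false, false) := by
                  simp [pvRunA, List.foldl_cons, pvStepA, pvFlushB, h0, h1, h2, h3, hd]
                rw [lhs, ih cs (Nat.le_of_succ_le_succ hcs)]
                simp [pvRunB, List.foldl_cons, pvStep2, h3, hd]
              · have lhs : pvRunA (c :: cs) (commands, buf, depth, false, false, false) =
                    pvRunA cs (commands, buf ++ [c], depth - 1, false, false, false) := by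
                  simp [pvRunA, List.foldl_cons, pvStepA, h0, h1, h2, h3, hd]
                rw [lhs, ih cs (Nat.le_of_succ_le_succ hcs)]
                simp [pvRunB, List.foldl_cons, pvStep2, h3, hd]
            · rw [if_neg h3]
              by_cases hs : PySem.Chars.isspace c = true
              · rw [if_pos hs]
                set r := pvSpan PySem.Chars.isspace cs with hr
                have hsplit : r.1 ++ r.2 = cs := pvSpan_append _ cs
                have hlen2 : r.2.length ≤ n := by
                  have := pvSpan_len PySem.Chars.isspace cs
                  rw [← hr] at this
                  exact le_trans this (Nat.le_of_succ_le_succ hcs)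
                have hmem : ∀ x ∈ r.1, PySem.Chars.isspace x = true := by
                  intro x hx; exact pvSpan_mem _ cs x (by rw [← hr] at *; exact hx)
                by_cases hd : depth = 0
                · subst hd
                  have step1 : pvStepA (commands, buf, 0, false, false, false) c =
                      (pvFlushB commands buf, [], 0, false, false, false) := by
                    by_cases hb : buf = []
                    · subst hb
                      have hnil : PySem.Chars.strip ([] : List Char) = [] := by decide
                      simp [pvStepA, pvFlushB, h0, h1, h2, h3, hs, hnil]
                    · simp [pvStepA, pvFlushB, h0, h1, h2, h3, hs, hb]
                  have lhs : pvRunA (c :: cs) (commands, buf, 0, false, false, false) =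
                      pvRunA r.2 (pvFlushB commands buf, [], 0, false, false, false) := by
                    simp only [pvRunA, List.foldl_cons, step1]
                    rw [← hsplit, List.foldl_append, pvFoldA_ws0 r.1 _ hmem]
                  rw [lhs, ih r.2 hlen2]
                  simp [pvRunB, List.foldl_cons, pvStep2]
                · have hmem' : ∀ x ∈ (c :: r.1),
                      (x ≠ ';' ∧ x ≠ '"' ∧ x ≠ '(' ∧ x ≠ ')') ∧
                        (depth = 0 → PySem.Chars.isspace x = false) := by
                    intro x hx
                    rcases List.mem_cons.mp hx with rfl | hx
                    · exact ⟨⟨h0, h1, h2, h3⟩, fun h => absurd h hd⟩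
                    · exact ⟨isspace_ne_special x (hmem x hx), fun h => absurd h hd⟩
                  have lhs : pvRunA (c :: cs) (commands, buf, depth, false, false, false) =
                      pvRunA r.2 (commands, buf ++ (c :: r.1), depth, false, false, false) := by
                    simp only [pvRunA]
                    rw [show (c :: cs) = (c :: r.1) ++ r.2 by simp [hsplit],
                      List.foldl_append, pvFoldA_append (c :: r.1) _ _ _ hmem']
                  rw [lhs, ih r.2 hlen2]
                  simp [pvRunB, List.foldl_cons, pvStep2, hd]
              · rw [if_neg hs]
                set r := pvSpan pvAtomChar cs with hr
                have hsplit : r.1 ++ r.2 = cs := pvSpan_append _ cs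
                have hlen2 : r.2.length ≤ n := by
                  have := pvSpan_len pvAtomChar cs
                  rw [← hr] at this
                  exact le_trans this (Nat.le_of_succ_le_succ hcs)
                have hmem : ∀ x ∈ (c :: r.1),
                    (x ≠ ';' ∧ x ≠ '"' ∧ x ≠ '(' ∧ x ≠ ')') ∧
                      (depth = 0 → PySem.Chars.isspace x = false) := by
                  intro x hx
                  rcases List.mem_cons.mp hx with rfl | hx
                  · exact ⟨⟨h0, h1, h2, h3⟩, fun _ => Bool.eq_false_iff.mpr hs⟩
                  · have hx' := pvSpan_mem _ cs x (by rw [← hr] at *; exact hx)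
                    unfold pvAtomChar at hx'
                    simp only [Bool.and_eq_true, Bool.not_eq_true',
                      Bool.or_eq_false_iff, decide_eq_false_iff_not] at hx'
                    refine ⟨⟨?_, ?_, ?_, ?_⟩, fun _ => ?_⟩ <;> tauto
                have lhs : pvRunA (c :: cs) (commands, buf, depth, false, false, false) =
                    pvRunA r.2 (commands, buf ++ (c :: r.1), depth, false, false, false) := by
                  simp only [pvRunA]
                  rw [show (c :: cs) = (c :: r.1) ++ r.2 by simp [hsplit],
                    List.foldl_append, pvFoldA_append (c :: r.1) _ _ _ hmem]
                rw [lhs, ih r.2 hlen2]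
                simp [pvRunB, List.foldl_cons, pvStep2]

-- ===== VERDICT (by name: the statement is the Claim_ definition above) =====
theorem split_top_level_commands_py_spec : Claim_equal_split_top_level_commands_py := by
  intro s _
  unfold Spec_split_top_level_commands_py split_top_level_commands_py split_top_level_commands_py_alt
  have := pvRunA_eq_runB s.toList.length s.toList le_rfl [] 0 []
  unfold pvRunA pvRunB at this
  exact this
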